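-- pv_equiv track=rewrite | github.com/Malo-Dantec/Python-1A | tp8/TP8a problème de mots de passe-20231107/motdepasse.py | petit_chiffre
-- ===== SOURCE A (Python) =====
-- def petit_chiffre(mot_de_passe):
--     nb_petit_chiffre = 0
--     petit_chiffre = None
--     for lettre in mot_de_passe:
--         if lettre.isdigit():
--             if petit_chiffre == None:
--                 petit_chiffre = lettre
--             elif lettre < petit_chiffre:
--                 petit_chiffre = lettre
--     for i in range(len(mot_de_passe)):
--         if mot_de_passe[i] == petit_chiffre:
--             nb_petit_chiffre += 1
--         if nb_petit_chiffre > 1: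
--             return False
--     return True
-- ===== SOURCE B (Python) =====
-- def petit_chiffre(mot_de_passe):
--     counts = {}
--     for c in mot_de_passe:
--         if c.isdigit():
--             counts[c] = counts.get(c, 0) + 1
--     if not counts:
--         return True
--     return counts[min(counts)] <= 1
-- ===== Notes on version B (the rewrite author's own statement) =====
-- stated objective: idiomatic
-- what changed: Replaces A's running-minimum scan plus a second full-string counting scan (with per-index indexing) with one pass building a per-digit frequency dict, then a min over its keys and a single lookup.
import Mathlib
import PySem

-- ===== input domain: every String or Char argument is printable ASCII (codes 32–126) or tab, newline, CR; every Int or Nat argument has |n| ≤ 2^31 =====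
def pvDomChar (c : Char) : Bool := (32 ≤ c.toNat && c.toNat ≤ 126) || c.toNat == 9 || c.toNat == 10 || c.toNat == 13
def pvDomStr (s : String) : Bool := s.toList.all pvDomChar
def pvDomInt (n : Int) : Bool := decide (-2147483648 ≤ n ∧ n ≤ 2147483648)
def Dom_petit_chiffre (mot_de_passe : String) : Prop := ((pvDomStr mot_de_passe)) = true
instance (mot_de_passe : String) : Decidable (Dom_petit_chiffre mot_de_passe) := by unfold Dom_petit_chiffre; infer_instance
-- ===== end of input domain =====

-- B builds a per-digit frequency dict in one pass, then looks up the smallest digit key;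
-- A tracks a running minimum digit and then re-scans the whole string counting it (idiomatic rewrite, not faster).

-- ===== PORT A =====
-- first loop of A: running minimum digit (None until the first digit is seen)
def pcMinLoop : List Char → Option Char → Option Char
  | [], m => m
  | c :: rest, m =>
      pcMinLoop rest
        (if PySem.Chars.isdigit c then
          match m with
          | none => some c
          | some p => if c < p then some c else some p
         else m)

-- second loop of A: count matches of the (optional) minimum, early return False when the count exceeds 1
def pcCountLoop : List Char → Option Char → Int → Bool
  | [], _, _ => true
  | c :: rest, m, n =>
      let n' := if some c = m then n + 1 else n
      if n' > 1 then false else pcCountLoop rest m n'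

def petit_chiffre (mot_de_passe : String) : Bool :=
  pcCountLoop mot_de_passe.toList (pcMinLoop mot_de_passe.toList none) 0

-- ===== PORT B =====
-- the final lines of Source B: emptiness test, min over the keys, one lookup
def pcCheck (counts : PySem.Dict Char Int) : Bool :=
  if counts.keys.isEmpty then true
  else
    match PySem.List.min? counts.keys (fun k => k) with
    | none => true
    | some k => decide (counts.getD k 0 ≤ 1)

def petit_chiffre_alt (mot_de_passe : String) : Bool :=
  pcCheck
    (mot_de_passe.toList.foldl
      (fun d c => if PySem.Chars.isdigit c then d.insert c (d.getD c 0 + 1) else d)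
      PySem.Dict.empty)

-- ===== PRECONDITION & SPEC =====
def Spec_petit_chiffre (mot_de_passe : String) (out : Bool) : Prop := out = petit_chiffre_alt mot_de_passe
instance (mot_de_passe : String) (out : Bool) : Decidable (Spec_petit_chiffre mot_de_passe out) := by unfold Spec_petit_chiffre; infer_instance

-- ===== CLAIM (what is proved, stated in full; the proofs are below) =====
def Claim_equal_petit_chiffre : Prop := ∀ (mot_de_passe : String), Dom_petit_chiffre mot_de_passe → Spec_petit_chiffre mot_de_passe (petit_chiffre mot_de_passe)

-- ===== LEMMAS AND PROOFS =====

-- A's first loop over the filtered digit list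
lemma pcMinLoop_eq_filter : ∀ (L : List Char) (m : Option Char),
    pcMinLoop L m = (L.filter (fun c => PySem.Chars.isdigit c)).foldl
      (fun m c => match m with
        | none => some c
        | some p => if c < p then some c else some p) m := by
  intro L
  induction L with
  | nil => intro m; simp [pcMinLoop]
  | cons c rest ih =>
      intro m
      by_cases h : PySem.Chars.isdigit c
      · simp [pcMinLoop, h, ih]
      · simp [pcMinLoop, h, ih]

lemma minFold_some : ∀ (t : List Char) (p : Char),
    t.foldl (fun m c => match m with
        | none => some c
        | some q => if c < q then some c else some q) (some p)
      = some (t.foldl min p) := by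
  intro t
  induction t with
  | nil => intro p; simp
  | cons c rest ih =>
      intro p
      rw [List.foldl_cons, List.foldl_cons]
      have hstep : (match some p with
        | none => some c
        | some q => if c < q then some c else some q)
          = if c < p then some c else some p := rfl
      rw [hstep]
      by_cases h : c < p
      · rw [if_pos h, ih c, min_eq_right (le_of_lt h)]
      · rw [if_neg h, ih p, min_eq_left (not_lt.mp h)]

lemma minFold_none (d : Char) (t : List Char) :
    (d :: t).foldl (fun m c => match m with
        | none => some c
        | some q => if c < q then some c else some q) none
      = some (t.foldl min d) := by
  rw [List.foldl_cons]
  exact minFold_some t d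

lemma foldl_min_mem : ∀ (t : List Char) (p : Char), t.foldl min p = p ∨ t.foldl min p ∈ t := by
  intro t
  induction t with
  | nil => intro p; simp
  | cons c rest ih =>
      intro p
      rcases ih (min p c) with h | h
      · rw [List.foldl_cons, h]
        rcases min_cases p c with ⟨h1, _⟩ | ⟨h1, _⟩
        · exact Or.inl h1
        · exact Or.inr (by simp [h1])
      · exact Or.inr (List.mem_cons_of_mem _ h)

lemma foldl_min_le : ∀ (t : List Char) (p : Char),
    t.foldl min p ≤ p ∧ ∀ y ∈ t, t.foldl min p ≤ y := by
  intro t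
  induction t with
  | nil => intro p; simp
  | cons c rest ih =>
      intro p
      obtain ⟨h1, h2⟩ := ih (min p c)
      refine ⟨le_trans h1 (min_le_left _ _), ?_⟩
      intro y hy
      rcases List.mem_cons.mp hy with rfl | hy
      · exact le_trans h1 (min_le_right _ _)
      · exact h2 y hy

-- A's second loop: once the running count would stay ≤ 1, the result is exactly "total ≤ 1"
lemma pcCountLoop_none : ∀ (L : List Char) (n : Int), n ≤ 1 → pcCountLoop L none n = true := by
  intro L
  induction L with
  | nil => intro n _; rfl
  | cons c rest ih =>
      intro n hn
      simp only [pcCountLoop]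
      have : ¬ (some c = (none : Option Char)) := by simp
      simp only [this, if_false]
      rw [if_neg (by omega)]
      exact ih n hn

lemma pcCountLoop_some : ∀ (L : List Char) (p : Char) (n : Int), n ≤ 1 →
    pcCountLoop L (some p) n = decide (n + (L.count p : Int) ≤ 1) := by
  intro L
  induction L with
  | nil => intro p n hn; simp [pcCountLoop]; omega
  | cons c rest ih =>
      intro p n hn
      by_cases hc : c = p
      · subst hc
        simp only [pcCountLoop, List.count_cons_self, if_true]
        by_cases h1 : n + 1 > 1
        · rw [if_pos h1]
          have : ¬ (n + ((rest.count c : Int) + 1) ≤ 1) := by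
            have : (0:Int) ≤ (rest.count c : Int) := Int.natCast_nonneg _
            omega
          simp [this]
        · rw [if_neg h1, ih c (n+1) (by omega)]
          simp only [decide_eq_decide]
          push_cast
          omega
      · have hne : ¬ (some c = some p) := by simp [hc]
        simp only [pcCountLoop, if_neg hne]
        rw [if_neg (by omega), ih p n hn, List.count_cons_of_ne hc]

-- B's dict-building loop is the counter of the digit sublist
lemma counts_eq_counter (L : List Char) :
    L.foldl (fun d c => if PySem.Chars.isdigit c then d.insert c (d.getD c 0 + 1) else d)
      PySem.Dict.empty
      = PySem.Dict.counter (L.filter (fun c => PySem.Chars.isdigit c)) := by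
  rw [← PySem.Dict.foldl_insert_getD_add_one_eq_counter, List.foldl_filter]

-- ===== VERDICT (by name: the statement is the Claim_ definition above) =====
theorem petit_chiffre_spec : Claim_equal_petit_chiffre := by
  intro s _
  unfold Spec_petit_chiffre petit_chiffre petit_chiffre_alt pcCheck
  rw [counts_eq_counter, pcMinLoop_eq_filter, PySem.Dict.keys_counter]
  cases hdse : List.filter (fun c => PySem.Chars.isdigit c) s.toList with
  | nil => simp [pcCountLoop_none, PySem.Set.ofList]
  | cons d t =>
      rw [minFold_none]
      set a := t.foldl min d with ha
      have haMem : a ∈ d :: t := by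
        rcases foldl_min_mem t d with h | h
        · exact h ▸ List.mem_cons_self
        · exact List.mem_cons_of_mem _ h
      have haMin : ∀ y ∈ d :: t, a ≤ y := by
        intro y hy
        obtain ⟨h1, h2⟩ := foldl_min_le t d
        rcases List.mem_cons.mp hy with rfl | hy
        · exact h1
        · exact h2 y hy
      have hne : ¬ (PySem.Set.ofList (d :: t)).isEmpty = true := by
        have hd : d ∈ PySem.Set.ofList (d :: t) := (PySem.Set.mem_ofList _ _).mpr (by simp)
        intro h
        rw [List.isEmpty_iff] at h
        simp [h] at hd
      rw [if_neg hne]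
      cases hmin : PySem.List.min? (PySem.Set.ofList (d :: t)) (fun k => k) with
      | none =>
          exfalso
          rw [PySem.List.min?_eq_none_iff] at hmin
          exact hne (by simp [hmin])
      | some b =>
          have hbMem : b ∈ d :: t := (PySem.Set.mem_ofList _ _).mp (PySem.List.min?_mem hmin)
          have hbMin : ∀ y ∈ PySem.Set.ofList (d :: t), b ≤ y :=
            fun y hy => PySem.List.min?_isMin hmin y hy
          have hab : a = b :=
            le_antisymm (haMin b hbMem) (hbMin a ((PySem.Set.mem_ofList _ _).mpr haMem))
          have haDigit : PySem.Chars.isdigit a := by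
            have h1 : a ∈ List.filter (fun c => PySem.Chars.isdigit c) s.toList := hdse ▸ haMem
            exact (List.mem_filter.mp h1).2
          have hcount : s.toList.count a = (d :: t).count a := by
            rw [← hdse]
            exact (List.count_filter (by simp [haDigit])).symm
          rw [pcCountLoop_some _ _ _ (by omega)]
          simp only [PySem.Dict.getD_counter, ← hab, hcount]
          simp
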